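-- pv_equiv track=rewrite | github.com/SunwoongH/algorithm | Programmers/Level2/요격 시스템.py | solution
-- ===== SOURCE A (Python) =====
-- def solution(targets):
--     targets = sorted(targets, key = lambda x: (x[0], -x[1]))
--     p = targets[0][1]
--     count = 0
--     for i in range(1, len(targets)):
--         if p <= targets[i][0]:
--             count += 1
--             p = targets[i][1]
--         elif p > targets[i][1]:
--             p = targets[i][1]
--     return count + 1
-- ===== SOURCE B (Python) =====
-- def solution(targets):
--     rest = list(targets)
--     i = min(range(len(rest)), key=lambda j: (rest[j][0], -rest[j][1]))
--     p = rest.pop(i)[1]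
--     count = 0
--     while rest:
--         i = min(range(len(rest)), key=lambda j: (rest[j][0], -rest[j][1]))
--         t = rest.pop(i)
--         if p <= t[0]:
--             count += 1
--             p = t[1]
--         elif p > t[1]:
--             p = t[1]
--     return count + 1
-- ===== Notes on version B (the rewrite author's own statement) =====
-- stated objective: alternative
-- what changed: Removes the sort entirely: instead of sorting by (start,-end) and scanning by index, B keeps a shrinking pool and repeatedly extracts the (start,-end)-minimal interval from it (selection-style, min over indices + pop), folding the greedy point/count state over the extraction order.
import Mathlib
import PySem

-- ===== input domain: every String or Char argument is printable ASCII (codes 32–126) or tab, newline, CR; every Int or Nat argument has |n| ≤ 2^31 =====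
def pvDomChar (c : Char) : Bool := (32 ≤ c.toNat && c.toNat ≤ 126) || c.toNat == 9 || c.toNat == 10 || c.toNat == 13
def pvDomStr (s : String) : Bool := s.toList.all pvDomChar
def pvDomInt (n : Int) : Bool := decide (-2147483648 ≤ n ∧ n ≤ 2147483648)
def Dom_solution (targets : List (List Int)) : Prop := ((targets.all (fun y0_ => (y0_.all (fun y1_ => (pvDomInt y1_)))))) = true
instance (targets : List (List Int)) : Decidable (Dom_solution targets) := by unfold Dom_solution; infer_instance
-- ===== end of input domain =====

-- B removes the sort: it repeatedly extracts the (start,-end)-minimal interval from a shrinking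
-- pool (selection-style) while folding the same greedy state (alternative algorithm, same value).

-- ===== PORT A =====
-- sorted(targets, key=lambda x: (x[0], -x[1])): Python compares the key tuples lexicographically,
-- ported with a Lex (Int × Int) key (same stable insertion sort, same comparison).
-- Indexing uses pyGetD with defaults; exact under Pre_ (targets nonempty, inner lists of length ≥ 2).
def solution (targets : List (List Int)) : Int :=
  let ts := PySem.List.sorted targets
    (fun x => toLex ((PySem.List.pyGetD x 0 0 : Int), -(PySem.List.pyGetD x 1 0)))
  let p : Int := PySem.List.pyGetD (PySem.List.pyGetD ts 0 []) 1 0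
  let r := (PySem.List.pyRange 1 (ts.length : Int)).foldl
    (fun st i =>
      let t := PySem.List.pyGetD ts i []
      if st.1 ≤ PySem.List.pyGetD t 0 0 then (PySem.List.pyGetD t 1 0, st.2 + 1)
      else if st.1 > PySem.List.pyGetD t 1 0 then (PySem.List.pyGetD t 1 0, st.2)
      else st)
    (p, (0 : Int))
  r.2 + 1

-- ===== PORT B =====
-- i = min(range(len(rest)), key=lambda j: (rest[j][0], -rest[j][1])): first index of a
-- (start,-end)-minimal interval, the same lexicographic tuple comparison as A's sort key.
def solutionSelIdx (rest : List (List Int)) : Option Int :=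
  PySem.List.min? (PySem.List.pyRange 0 (rest.length : Int))
    (fun j => toLex ((PySem.List.pyGetD (PySem.List.pyGetD rest j []) 0 0 : Int),
                     -(PySem.List.pyGetD (PySem.List.pyGetD rest j []) 1 0)))

-- the while loop, rendered with fuel = rest.length: each round pops one element, so the
-- fuel is never exhausted (the fuel-out branch just returns the count).
def solutionAltLoop : Nat → List (List Int) → Int → Int → Int
  | 0, _, _, count => count
  | fuel + 1, rest, p, count =>
    if rest.isEmpty then count
    else
      match solutionSelIdx rest with
      | none => count  -- unreachable: rest is nonempty here
      | some i =>
        match PySem.List.pop? rest i with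
        | none => count  -- unreachable: i is a valid index
        | some (t, rest') =>
          if p ≤ PySem.List.pyGetD t 0 0 then
            solutionAltLoop fuel rest' (PySem.List.pyGetD t 1 0) (count + 1)
          else if p > PySem.List.pyGetD t 1 0 then
            solutionAltLoop fuel rest' (PySem.List.pyGetD t 1 0) count
          else
            solutionAltLoop fuel rest' p count

def solution_alt (targets : List (List Int)) : Int :=
  match solutionSelIdx targets with
  | none => 0  -- unreachable under Pre_ (targets nonempty; Python raises ValueError here)
  | some i =>
    match PySem.List.pop? targets i with
    | none => 0  -- unreachable: i is a valid index
    | some (t, rest) =>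
      solutionAltLoop rest.length rest (PySem.List.pyGetD t 1 0) 0 + 1

-- ===== PRECONDITION & SPEC =====
-- Pre_ excludes exactly the crashes: empty targets and inner lists shorter than 2, on which A
-- raises IndexError (and B raises ValueError / IndexError).
def Pre_solution (targets : List (List Int)) : Prop :=
  targets ≠ [] ∧ ∀ t ∈ targets, 2 ≤ t.length
instance (targets : List (List Int)) : Decidable (Pre_solution targets) := by
  unfold Pre_solution; infer_instance

def pvWitness_solution : List (List Int) := [[4, 5], [4, 8], [1, 4], [3, 7], [10, 14]]

def Spec_solution (targets : List (List Int)) (out : Int) : Prop := out = solution_alt targets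
instance (targets : List (List Int)) (out : Int) : Decidable (Spec_solution targets out) := by
  unfold Spec_solution; infer_instance

-- ===== CLAIM (what is proved, stated in full; the proofs are below) =====
def Claim_equal_solution : Prop := ∀ (targets : List (List Int)), Dom_solution targets → Pre_solution targets → Spec_solution targets (solution targets)

-- ===== LEMMAS AND PROOFS =====

-- start / end of an interval, as the ports read them
def iS (t : List Int) : Int := PySem.List.pyGetD t 0 0
def iE (t : List Int) : Int := PySem.List.pyGetD t 1 0

-- the pair of values either port actually reads from an interval
def pairOf (t : List Int) : Int × Int := (iS t, iE t)

-- the shared sort key, at pair level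
def pkey (q : Int × Int) : Lex (Int × Int) := toLex (q.1, -q.2)

lemma pkey_injective : Function.Injective pkey := by
  intro a b h
  obtain ⟨h1, h2⟩ := Prod.mk.inj (congrArg ofLex h)
  exact Prod.ext h1 (by omega)

-- A's scan over the tail of the sorted list
def scanA : Int → List (List Int) → Int
  | _, [] => 0
  | p, t :: ts =>
    if p ≤ iS t then 1 + scanA (iE t) ts
    else if p > iE t then scanA (iE t) ts
    else scanA p ts

-- the same scan at pair level
def scanP : Int → List (Int × Int) → Int
  | _, [] => 0
  | p, q :: qs =>
    if p ≤ q.1 then 1 + scanP q.2 qs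
    else if p > q.2 then scanP q.2 qs
    else scanP p qs

lemma scanA_map (L : List (List Int)) : ∀ p : Int, scanA p L = scanP p (L.map pairOf) := by
  induction L with
  | nil => intro p; simp [scanA, scanP]
  | cons t ts ih =>
      intro p
      rw [List.map_cons, scanA, scanP]
      by_cases h1 : p ≤ iS t
      · rw [if_pos h1, if_pos (show p ≤ (pairOf t).1 from h1), ih]; rfl
      · rw [if_neg h1, if_neg (show ¬ p ≤ (pairOf t).1 from h1)]
        by_cases h2 : p > iE t
        · rw [if_pos h2, if_pos (show p > (pairOf t).2 from h2), ih]; rfl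
        · rw [if_neg h2, if_neg (show ¬ p > (pairOf t).2 from h2), ih]

-- the canonical sorted pair list of a pair multiset
def SP (P : List (Int × Int)) : List (Int × Int) := PySem.List.sorted P pkey

-- pulling one pkey-minimal element out of P pulls the head off SP P
lemma SP_cons_of_min (P Q : List (Int × Int)) (v : Int × Int)
    (hmin : ∀ q ∈ P, pkey v ≤ pkey q) (hQ : P.Perm (v :: Q)) :
    SP P = v :: SP Q := by
  have hperm : (SP P).Perm P := PySem.List.sorted_perm P pkey false
  obtain ⟨h, tl, hSP⟩ : ∃ h tl, SP P = h :: tl := by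
    cases hsp : SP P with
    | nil =>
        have : P = [] := (PySem.List.sorted_eq_nil_iff P pkey false).mp hsp
        subst this
        exact absurd hQ.length_eq (by simp)
    | cons a l => exact ⟨a, l, rfl⟩
  have hhead : h = v := by
    apply pkey_injective
    have h1 : pkey h ≤ pkey v := by
      refine PySem.List.key_head_sorted_le P pkey hSP v ?_
      exact hQ.symm.mem_iff.mp (by simp)
    have h2 : pkey v ≤ pkey h := hmin h (hperm.mem_iff.mp (by simp [hSP]))
    exact le_antisymm h1 h2
  subst hhead
  have htl : tl.Perm Q := by
    have : (h :: tl).Perm (h :: Q) := by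
      rw [← hSP]; exact hperm.trans hQ
    exact this.cons_inv
  have hpw : tl.Pairwise (fun a b => pkey a ≤ pkey b) := by
    have := PySem.List.sorted_pairwise P pkey
    rw [show PySem.List.sorted P pkey = SP P from rfl, hSP] at this
    exact (List.pairwise_cons.mp this).2
  have hSQ : tl = SP Q := by
    refine PySem.List.eq_of_perm_of_pairwise_le_of_injective pkey pkey_injective
      (htl.trans (PySem.List.sorted_perm Q pkey false).symm) hpw
      (PySem.List.sorted_pairwise Q pkey)
  rw [hSP, hSQ]

-- the pair sequence of A's sorted list is the canonical sorted pair list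
lemma map_pairOf_sorted (targets : List (List Int)) :
    (PySem.List.sorted targets
      (fun x => toLex ((PySem.List.pyGetD x 0 0 : Int), -(PySem.List.pyGetD x 1 0)))).map pairOf
    = SP (targets.map pairOf) := by
  refine PySem.List.eq_of_perm_of_pairwise_le_of_injective pkey pkey_injective ?_ ?_
    (PySem.List.sorted_pairwise (targets.map pairOf) pkey)
  · exact ((PySem.List.sorted_perm targets _ false).map pairOf).trans
      (PySem.List.sorted_perm (targets.map pairOf) pkey false).symm
  · have := PySem.List.sorted_pairwise targets
      (fun x => toLex ((PySem.List.pyGetD x 0 0 : Int), -(PySem.List.pyGetD x 1 0)))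
    exact (List.pairwise_map).mpr this

-- what solutionSelIdx returns: a valid index whose interval's pair is pkey-minimal in the pool
lemma selIdx_spec (rest : List (List Int)) (i : Int) (hi : solutionSelIdx rest = some i) :
    0 ≤ i ∧ ∃ h : i.toNat < rest.length,
      ∀ q ∈ rest.map pairOf, pkey (pairOf (rest[i.toNat]'h)) ≤ pkey q := by
  unfold solutionSelIdx at hi
  have hmem := PySem.List.min?_mem hi
  rw [PySem.List.mem_pyRange_one] at hmem
  obtain ⟨h0, hlt⟩ := hmem
  have hnat : i.toNat < rest.length := by omega
  refine ⟨h0, hnat, ?_⟩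
  intro q hq
  obtain ⟨u, hu, rfl⟩ := List.mem_map.mp hq
  obtain ⟨j, hj, rfl⟩ := List.mem_iff_getElem.mp hu
  have hjmem : (j : Int) ∈ PySem.List.pyRange 0 (rest.length : Int) := by
    rw [PySem.List.mem_pyRange_one]
    constructor <;> omega
  have hmin := PySem.List.min?_isMin hi (j : Int) hjmem
  have e1 : PySem.List.pyGetD rest i [] = rest[i.toNat]'hnat :=
    PySem.List.pyGetD_eq_getElem rest [] h0 hlt
  have e2 : PySem.List.pyGetD rest (j : Int) [] = rest[j] := by
    have := PySem.List.pyGetD_eq_getElem rest (i := (j : Int)) [] (by omega) (by exact_mod_cast hj)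
    simpa using this
  rw [e1, e2] at hmin
  exact hmin

-- the B loop computes the pair-level scan of the canonically sorted remaining pool
lemma altLoop_eq_scanP : ∀ (fuel : Nat) (rest : List (List Int)) (p c : Int),
    rest.length ≤ fuel →
    solutionAltLoop fuel rest p c = c + scanP p (SP (rest.map pairOf)) := by
  intro fuel
  induction fuel with
  | zero =>
      intro rest p c hlen
      have h0 : rest = [] := List.eq_nil_of_length_eq_zero (Nat.le_zero.mp hlen)
      subst h0
      simp [solutionAltLoop, SP, PySem.List.sorted, scanP]
  | succ fuel ih =>
      intro rest p c hlen
      cases rest with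
      | nil => simp [solutionAltLoop, SP, PySem.List.sorted, scanP]
      | cons r rs =>
        obtain ⟨i, hi⟩ : ∃ i, solutionSelIdx (r :: rs) = some i := by
          cases h : solutionSelIdx (r :: rs) with
          | some i => exact ⟨i, rfl⟩
          | none =>
              unfold solutionSelIdx at h
              rw [PySem.List.min?_eq_none_iff] at h
              have : (0 : Int) ∈ PySem.List.pyRange 0 ((r :: rs).length : Int) := by
                rw [PySem.List.mem_pyRange_one]
                constructor
                · omega
                · simp
              rw [h] at this
              simp at this
        obtain ⟨h0, hnat, hmin⟩ := selIdx_spec _ i hi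
        have hpop : PySem.List.pop? (r :: rs) i =
            some ((r :: rs)[i.toNat], (r :: rs).eraseIdx i.toNat) := by
          have := PySem.List.pop?_natCast (r :: rs) i.toNat hnat
          rwa [Int.toNat_of_nonneg h0] at this
        have hperm : (r :: rs).Perm ((r :: rs)[i.toNat] :: (r :: rs).eraseIdx i.toNat) :=
          (List.getElem_cons_eraseIdx_perm hnat).symm
        have hSP : SP ((r :: rs).map pairOf) =
            pairOf ((r :: rs)[i.toNat]) :: SP (((r :: rs).eraseIdx i.toNat).map pairOf) := by
          refine SP_cons_of_min _ _ _ ?_ (hperm.map pairOf)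
          intro q hq
          exact hmin q hq
        have hlen' : ((r :: rs).eraseIdx i.toNat).length ≤ fuel := by
          rw [List.length_eraseIdx_of_lt hnat]
          simp only [List.length_cons] at hlen ⊢
          omega
        rw [solutionAltLoop]
        simp only [List.isEmpty_cons, Bool.false_eq_true, if_false, hi, hpop]
        rw [hSP, scanP]
        by_cases h1 : p ≤ iS ((r :: rs)[i.toNat])
        · rw [if_pos (show p ≤ PySem.List.pyGetD ((r :: rs)[i.toNat]) 0 0 from h1),
            if_pos (show p ≤ (pairOf ((r :: rs)[i.toNat])).1 from h1),
            ih _ _ _ hlen']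
          simp only [pairOf, iS, iE]
          ring
        · rw [if_neg (show ¬ p ≤ PySem.List.pyGetD ((r :: rs)[i.toNat]) 0 0 from h1),
            if_neg (show ¬ p ≤ (pairOf ((r :: rs)[i.toNat])).1 from h1)]
          by_cases h2 : p > iE ((r :: rs)[i.toNat])
          · rw [if_pos (show p > PySem.List.pyGetD ((r :: rs)[i.toNat]) 1 0 from h2),
              if_pos (show p > (pairOf ((r :: rs)[i.toNat])).2 from h2),
              ih _ _ _ hlen']
            simp only [pairOf, iS, iE]
          · rw [if_neg (show ¬ p > PySem.List.pyGetD ((r :: rs)[i.toNat]) 1 0 from h2),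
              if_neg (show ¬ p > (pairOf ((r :: rs)[i.toNat])).2 from h2),
              ih _ _ _ hlen']

-- the state-pair fold of port A is scanA on the second component
lemma foldA (L : List (List Int)) : ∀ (p c : Int),
    (L.foldl (fun st t =>
        if st.1 ≤ PySem.List.pyGetD t 0 0 then (PySem.List.pyGetD t 1 0, st.2 + 1)
        else if st.1 > PySem.List.pyGetD t 1 0 then (PySem.List.pyGetD t 1 0, st.2)
        else st) (p, c)).2 = c + scanA p L := by
  induction L with
  | nil => intro p c; simp [scanA]
  | cons t ts ih =>
      intro p c
      rw [List.foldl_cons]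
      by_cases h1 : p ≤ PySem.List.pyGetD t 0 0
      · rw [if_pos h1, ih, scanA, if_pos (show p ≤ iS t from h1)]
        simp only [iE]; ring
      · rw [if_neg h1]
        by_cases h2 : p > PySem.List.pyGetD t 1 0
        · rw [if_pos h2, ih, scanA, if_neg (show ¬ p ≤ iS t from h1),
            if_pos (show p > iE t from h2)]
          simp [iE]
        · rw [if_neg h2, ih, scanA, if_neg (show ¬ p ≤ iS t from h1),
            if_neg (show ¬ p > iE t from h2)]

-- ===== VERDICT (by name: the statement is the Claim_ definition above) =====
theorem solution_spec : Claim_equal_solution := by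
  intro targets _ hP
  unfold Spec_solution
  obtain ⟨hne, _⟩ := hP
  -- A side: sorted list is nonempty
  obtain ⟨t, rest, hts⟩ : ∃ t rest, PySem.List.sorted targets
      (fun x => toLex ((PySem.List.pyGetD x 0 0 : Int), -(PySem.List.pyGetD x 1 0))) = t :: rest := by
    cases h : PySem.List.sorted targets
        (fun x => toLex ((PySem.List.pyGetD x 0 0 : Int), -(PySem.List.pyGetD x 1 0))) with
    | nil => exact absurd ((PySem.List.sorted_eq_nil_iff _ _ _).mp h) hne
    | cons a l => exact ⟨a, l, rfl⟩
  have hA : solution targets = scanP (iE t) (rest.map pairOf) + 1 := by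
    simp only [solution, hts, PySem.List.pyGetD_zero_cons]
    rw [PySem.List.foldl_pyRange_pyGetD' (t :: rest) []
      (fun st u =>
        if st.1 ≤ PySem.List.pyGetD u 0 0 then (PySem.List.pyGetD u 1 0, st.2 + 1)
        else if st.1 > PySem.List.pyGetD u 1 0 then (PySem.List.pyGetD u 1 0, st.2)
        else st) ((PySem.List.pyGetD t 1 0), (0 : Int)) (by norm_num : (0 : Int) ≤ 1)]
    simp only [Int.toNat_one, List.drop_succ_cons, List.drop_zero]
    rw [foldA, scanA_map]
    simp [iE]
  -- the canonical sorted pair list, seen from A's side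
  have hSPA : SP (targets.map pairOf) = pairOf t :: rest.map pairOf := by
    rw [← map_pairOf_sorted, hts, List.map_cons]
  -- B side: the first extraction
  obtain ⟨i, hi⟩ : ∃ i, solutionSelIdx targets = some i := by
    cases h : solutionSelIdx targets with
    | some i => exact ⟨i, rfl⟩
    | none =>
        unfold solutionSelIdx at h
        rw [PySem.List.min?_eq_none_iff] at h
        have hmem : (0 : Int) ∈ PySem.List.pyRange 0 (targets.length : Int) := by
          rw [PySem.List.mem_pyRange_one]
          have : targets.length ≠ 0 := fun h2 => hne (List.eq_nil_of_length_eq_zero h2)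
          omega
        rw [h] at hmem
        simp at hmem
  obtain ⟨h0, hnat, hmin⟩ := selIdx_spec _ i hi
  have hpop : PySem.List.pop? targets i =
      some (targets[i.toNat], targets.eraseIdx i.toNat) := by
    have := PySem.List.pop?_natCast targets i.toNat hnat
    rwa [Int.toNat_of_nonneg h0] at this
  have hperm : targets.Perm (targets[i.toNat] :: targets.eraseIdx i.toNat) :=
    (List.getElem_cons_eraseIdx_perm hnat).symm
  have hSPB : SP (targets.map pairOf) =
      pairOf targets[i.toNat] :: SP ((targets.eraseIdx i.toNat).map pairOf) :=
    SP_cons_of_min _ _ _ hmin (hperm.map pairOf)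
  -- the two head/tail decompositions coincide
  have hhead : pairOf targets[i.toNat] = pairOf t := by
    have := hSPB.symm.trans hSPA
    exact (List.cons.injEq .. ▸ this).1
  have htail : SP ((targets.eraseIdx i.toNat).map pairOf) = rest.map pairOf := by
    have := hSPB.symm.trans hSPA
    exact (List.cons.injEq .. ▸ this).2
  have hB : solution_alt targets = scanP (iE t) (rest.map pairOf) + 1 := by
    simp only [solution_alt, hi, hpop]
    rw [altLoop_eq_scanP _ _ _ _ le_rfl, htail]
    have : PySem.List.pyGetD targets[i.toNat] 1 0 = iE t := congrArg Prod.snd hhead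
    rw [this]
    ring
  rw [hA, hB]
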